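-- pv_equiv track=rewrite | github.com/pypi-data/pypi-mirror-380 | packages/hepai/hepai-1.2.13.tar.gz/hepai-1.2.13/hai/uaii/utils/general.py | latest2determined
-- ===== SOURCE A (Python) =====
-- def latest2determined(all_dict, name):
--     """
--     从字典中找到最新的指定版本
--     return: the latest version, i.e. 1.1 or 1.2
--     """
--     keys = list(all_dict.keys())
--     name = name.lower()
--     macthed = [x for x in keys if name in x.lower()]
--     if len(macthed) == 0:
--         return None
--     else:
--         versions = [all_dict[x]['version'] for x in macthed]
--         version = sorted(versions)[-1]
--         return version
-- ===== SOURCE B (Python) =====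
-- def latest2determined(all_dict, name):
--     """Single scan: running max of 'version' over keys matching name."""
--     name = name.lower()
--     best = None
--     for key, val in all_dict.items():
--         if name in key.lower():
--             v = val['version']
--             if best is None or v > best:
--                 best = v
--     return best
-- ===== Notes on version B (the rewrite author's own statement) =====
-- stated objective: simpler
-- what changed: Replaced A's build-keys/filter/build-versions-list/sort/take-last pipeline by a single running-max scan over the items that keeps the best matching version seen so far.
import Mathlib
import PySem

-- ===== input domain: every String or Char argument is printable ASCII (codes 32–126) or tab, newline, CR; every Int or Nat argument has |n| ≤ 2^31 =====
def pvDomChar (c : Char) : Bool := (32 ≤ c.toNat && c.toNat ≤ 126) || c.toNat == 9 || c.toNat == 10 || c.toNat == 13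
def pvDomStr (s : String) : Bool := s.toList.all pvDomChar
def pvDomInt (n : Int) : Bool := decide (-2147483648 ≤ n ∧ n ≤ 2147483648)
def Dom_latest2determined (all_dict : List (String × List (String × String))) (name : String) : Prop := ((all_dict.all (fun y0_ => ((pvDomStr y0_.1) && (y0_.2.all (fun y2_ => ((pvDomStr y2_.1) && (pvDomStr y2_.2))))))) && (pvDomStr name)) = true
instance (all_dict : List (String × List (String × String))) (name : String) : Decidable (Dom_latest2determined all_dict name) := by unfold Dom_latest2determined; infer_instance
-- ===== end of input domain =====

-- B replaces A's filter + sort + index-last pipeline by a single running-max scan over the items (objective: simpler).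

-- ===== PORT A =====
-- all_dict[x] = first-match association-list lookup (faithful on Pre_: keys Nodup);
-- the inner ['version'] lookup is total via getD "" — Pre_ guarantees the key is present
-- (Python raises KeyError there, which Pre_ excludes).
def latest2determined (all_dict : List (String × List (String × String))) (name : String) : Option String :=
  let keys := all_dict.map Prod.fst
  let nameL := PySem.Str.lower name
  let matched := keys.filter (fun x => PySem.Str.isIn nameL (PySem.Str.lower x))
  if matched.length = 0 then none
  else
    let versions := matched.map (fun x => (((all_dict.lookup x).getD []).lookup "version").getD "")
    let version := PySem.List.pyGetD (PySem.List.sorted versions (fun v => v) false) (-1) ""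
    some version

-- ===== PORT B =====
-- B's loop: best is None-or-current-maximum; val['version'] total via getD "" (Pre_ guarantees presence).
def pvStep (b : Option String) (v : String) : Option String :=
  match b with
  | none => some v
  | some x => if x < v then some v else some x

def latest2determinedAltGo (nameL : String) : List (String × List (String × String)) → Option String → Option String
  | [], best => best
  | (k, v) :: rest, best =>
      if PySem.Str.isIn nameL (PySem.Str.lower k) then
        latest2determinedAltGo nameL rest (pvStep best ((v.lookup "version").getD ""))
      else latest2determinedAltGo nameL rest best

def latest2determined_alt (all_dict : List (String × List (String × String))) (name : String) : Option String :=
  latest2determinedAltGo (PySem.Str.lower name) all_dict none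

-- ===== PRECONDITION & SPEC =====
-- Pre_ excludes (a) association lists with duplicate keys, which do not represent a Python dict
-- (the Python dict constructor collapses them), and (b) inputs where some matched value lacks the
-- "version" key, on which Python A raises KeyError.
def Pre_latest2determined (all_dict : List (String × List (String × String))) (name : String) : Prop :=
  (all_dict.map Prod.fst).Nodup ∧
  ∀ p ∈ all_dict, PySem.Str.isIn (PySem.Str.lower name) (PySem.Str.lower p.1) = true →
    (p.2.lookup "version").isSome
instance (all_dict : List (String × List (String × String))) (name : String) : Decidable (Pre_latest2determined all_dict name) := by unfold Pre_latest2determined; infer_instance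

def pvWitness_latest2determined : (List (String × List (String × String))) × String :=
  ([("Alpha", [("version", "1.0")]), ("beta", [("version", "2.0")])], "alp")

def Spec_latest2determined (all_dict : List (String × List (String × String))) (name : String) (out : Option String) : Prop := out = latest2determined_alt all_dict name
instance (all_dict : List (String × List (String × String))) (name : String) (out : Option String) : Decidable (Spec_latest2determined all_dict name out) := by unfold Spec_latest2determined; infer_instance

-- ===== CLAIM (what is proved, stated in full; the proofs are below) =====
def Claim_equal_latest2determined : Prop := ∀ (all_dict : List (String × List (String × String))) (name : String), Dom_latest2determined all_dict name → Pre_latest2determined all_dict name → Spec_latest2determined all_dict name (latest2determined all_dict name)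

-- ===== LEMMAS AND PROOFS =====

-- first-match lookup on a duplicate-free association list finds the pair itself
theorem pv_lookup_of_mem {β : Type} (l : List (String × β)) (k : String) (v : β)
    (h : (k, v) ∈ l) (hn : (l.map Prod.fst).Nodup) : l.lookup k = some v := by
  induction l with
  | nil => cases h
  | cons a t ih =>
    simp only [List.map_cons, List.nodup_cons] at hn
    rcases List.mem_cons.mp h with h | h
    · rw [← h]; simp [List.lookup]
    · have hne : (k == a.1) = false := by
        simp only [beq_eq_false_iff_ne]; rintro rfl
        exact hn.1 (List.mem_map.mpr ⟨_, h, rfl⟩)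
      simp [List.lookup, hne, ih h hn.2]

-- in a ≤-pairwise list every element is at most the last one
theorem pv_le_getLast (l : List String) (h : l ≠ []) (hp : l.Pairwise (· ≤ ·)) :
    ∀ a ∈ l, a ≤ l.getLast h := by
  induction l with
  | nil => cases h rfl
  | cons x t ih =>
    intro a ha
    rcases List.mem_cons.mp ha with rfl | ha
    · cases t with
      | nil => simp
      | cons y s =>
        rw [List.getLast_cons (by simp)]
        have hx : ∀ b ∈ y :: s, a ≤ b := (List.pairwise_cons.mp hp).1
        exact le_trans (hx y (by simp))
          (ih (by simp) (List.pairwise_cons.mp hp).2 y (by simp))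
    · cases t with
      | nil => cases ha
      | cons y s =>
        rw [List.getLast_cons (by simp)]
        exact ih (by simp) (List.pairwise_cons.mp hp).2 a ha

-- last element of the Python sort = running max
theorem pv_sorted_last_eq_foldl_max (w : String) (t : List String) :
    (PySem.List.sorted (w :: t) (fun v => v) false).getLast
      (by
        intro hnil
        have := PySem.List.sorted_perm (w :: t) (fun v => v) false
        rw [hnil] at this
        exact (List.cons_ne_nil w t) this.symm.eq_nil) = t.foldl max w := by
  have hperm := PySem.List.sorted_perm (w :: t) (fun v => v) false
  have hpair := PySem.List.sorted_pairwise (w :: t) (fun v => v)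
  have hm : PySem.List.max? (w :: t) (fun y => y) = some (t.foldl max w) :=
    PySem.List.max?_id_cons w t
  have hmem : t.foldl max w ∈ w :: t := PySem.List.max?_mem hm
  have hmax : ∀ y ∈ w :: t, y ≤ t.foldl max w := by
    intro y hy; simpa using PySem.List.max?_isMax hm y hy
  set s := PySem.List.sorted (w :: t) (fun v => v) false with hs
  have hne : s ≠ [] := by
    intro hnil; rw [hnil] at hperm; exact (List.cons_ne_nil w t) hperm.symm.eq_nil
  apply le_antisymm
  · exact hmax _ (hperm.mem_iff.mp (List.getLast_mem hne))
  · exact pv_le_getLast s hne hpair _ (hperm.mem_iff.mpr hmem)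

-- B's loop is a fold of pvStep over the matched versions
theorem pv_altGo_eq (nameL : String) (l : List (String × List (String × String))) :
    ∀ best, latest2determinedAltGo nameL l best =
      ((l.filter (fun p => PySem.Str.isIn nameL (PySem.Str.lower p.1))).map
        (fun p => ((p.2.lookup "version").getD ""))).foldl pvStep best := by
  induction l with
  | nil => intro best; rfl
  | cons a t ih =>
    intro best
    rcases a with ⟨k, v⟩
    by_cases hk : PySem.Str.isIn nameL (PySem.Str.lower k) = true
    · rw [show latest2determinedAltGo nameL ((k, v) :: t) best
            = latest2determinedAltGo nameL t (pvStep best ((v.lookup "version").getD "")) by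
          simp only [latest2determinedAltGo, hk, if_true]]
      rw [List.filter_cons, if_pos hk, List.map_cons, List.foldl_cons]
      exact ih _
    · rw [show latest2determinedAltGo nameL ((k, v) :: t) best
            = latest2determinedAltGo nameL t best by
          simp only [latest2determinedAltGo, hk, if_false, Bool.false_eq_true]]
      rw [List.filter_cons, if_neg hk]
      exact ih best

-- folding pvStep from a present best is the running max
theorem pv_optfold_some (t : List String) :
    ∀ b, t.foldl pvStep (some b) = some (t.foldl max b) := by
  induction t with
  | nil => intro b; rfl
  | cons v s ih =>
    intro b
    have hstep : pvStep (some b) v = some (max b v) := by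
      by_cases h : b < v
      · simp [pvStep, h, max_eq_right h.le]
      · simp [pvStep, h, max_eq_left (not_lt.mp h)]
    rw [List.foldl_cons, hstep, ih, List.foldl_cons]

-- ===== VERDICT (by name: the statement is the Claim_ definition above) =====
theorem latest2determined_spec : Claim_equal_latest2determined := by
  intro all_dict name _hdom hpre
  unfold Spec_latest2determined
  unfold latest2determined latest2determined_alt
  dsimp only []
  rw [pv_altGo_eq]
  have hfm : (all_dict.map Prod.fst).filter
        (fun x => PySem.Str.isIn (PySem.Str.lower name) (PySem.Str.lower x))
      = (all_dict.filter (fun p => PySem.Str.isIn (PySem.Str.lower name) (PySem.Str.lower p.1))).map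
          Prod.fst := by
    rw [List.filter_map]; rfl
  have hvers : ((all_dict.map Prod.fst).filter
        (fun x => PySem.Str.isIn (PySem.Str.lower name) (PySem.Str.lower x))).map
        (fun x => (((all_dict.lookup x).getD []).lookup "version").getD "")
      = (all_dict.filter (fun p => PySem.Str.isIn (PySem.Str.lower name) (PySem.Str.lower p.1))).map
          (fun p => ((p.2.lookup "version").getD "")) := by
    rw [hfm, List.map_map]
    apply List.map_congr_left
    intro p hp
    have hmem : p ∈ all_dict := List.mem_of_mem_filter hp
    have : all_dict.lookup p.1 = some p.2 := pv_lookup_of_mem all_dict p.1 p.2 hmem hpre.1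
    simp only [Function.comp_apply, this, Option.getD_some]
  by_cases hnil : (all_dict.filter (fun p => PySem.Str.isIn (PySem.Str.lower name) (PySem.Str.lower p.1))) = []
  · rw [hfm, hnil]
    rfl
  · have hvs : (all_dict.filter (fun p => PySem.Str.isIn (PySem.Str.lower name) (PySem.Str.lower p.1))).map
        (fun p => ((p.2.lookup "version").getD "")) ≠ [] := by
      simpa [List.map_eq_nil_iff] using hnil
    obtain ⟨w, t, hwt⟩ := List.exists_cons_of_ne_nil hvs
    have hlen : ¬ ((all_dict.map Prod.fst).filter
        (fun x => PySem.Str.isIn (PySem.Str.lower name) (PySem.Str.lower x))).length = 0 := by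
      rw [hfm, List.length_map]
      intro h
      exact hnil (List.eq_nil_of_length_eq_zero h)
    rw [if_neg hlen, hvers, hwt, List.foldl_cons,
      show pvStep none w = some w from rfl, pv_optfold_some]
    congr 1
    rw [PySem.List.pyGetD_neg_one _ _ (by
      intro h
      have := PySem.List.sorted_perm (w :: t) (fun v => v) false
      rw [h] at this
      exact (List.cons_ne_nil w t) this.symm.eq_nil)]
    exact pv_sorted_last_eq_foldl_max w t
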